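-- pv_equiv track=rewrite | github.com/cjdool/progswtest | level2/biggestnum.py | twocmp
-- ===== SOURCE A (Python) =====
-- def twocmp(x, y):
--     mindigit = min(len(x), len(y))
--     for i in range(mindigit):
--         if x[i] > y[i]:
--             return -1
--         elif x[i] < y[i]:
--             return 1
--
--     if x + y > y + x:
--         return -1
--     elif x + y < y + x:
--         return 1
--     else:
--         return 0
-- ===== SOURCE B (Python) =====
-- def twocmp(x, y):
--     s1 = x + y
--     s2 = y + x
--     return -1 if s1 > s2 else (1 if s1 < s2 else 0)
-- ===== Notes on version B (the rewrite author's own statement) =====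
-- stated objective: simpler
-- what changed: Removed the per-character prefix loop entirely: B is a single three-way comparison of x+y against y+x, which the loop in A merely short-circuits.
import Mathlib
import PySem

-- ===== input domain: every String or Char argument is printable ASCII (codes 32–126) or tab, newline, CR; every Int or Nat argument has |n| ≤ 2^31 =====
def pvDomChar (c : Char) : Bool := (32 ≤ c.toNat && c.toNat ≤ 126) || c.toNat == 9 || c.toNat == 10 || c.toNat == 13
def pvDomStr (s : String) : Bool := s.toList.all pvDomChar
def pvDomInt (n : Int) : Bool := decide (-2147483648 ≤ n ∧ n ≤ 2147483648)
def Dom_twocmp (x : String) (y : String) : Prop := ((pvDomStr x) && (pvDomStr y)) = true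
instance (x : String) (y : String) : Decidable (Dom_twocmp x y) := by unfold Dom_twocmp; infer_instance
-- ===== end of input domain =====

-- B removes A's per-character prefix loop and decides with one three-way comparison of x+y vs y+x (simpler decomposition; same asymptotic cost).


-- shared helper: Python's '<' on strings, i.e. lexicographic comparison of code points
-- (exact: Python compares strings by code point, Char '<' compares .val)
def pyStrLt : List Char → List Char → Bool
  | [], [] => false
  | [], _ :: _ => true
  | _ :: _, [] => false
  | c :: s, d :: t => if c < d then true else if d < c then false else pyStrLt s t

-- ===== PORT A =====
-- A-side helper: the 'for i in range(mindigit)' loop over the common prefix;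
-- some r = early return, none = loop falls through
def twocmpLoop : List Char → List Char → Option Int
  | c :: s, d :: t =>
    if d < c then some (-1)               -- x[i] > y[i]
    else if c < d then some 1             -- x[i] < y[i]
    else twocmpLoop s t
  | _, _ => none

def twocmp (x : String) (y : String) : Int :=
  match twocmpLoop x.toList y.toList with
  | some r => r
  | none =>
    let s1 := x.toList ++ y.toList        -- x + y
    let s2 := y.toList ++ x.toList        -- y + x
    if pyStrLt s2 s1 then -1
    else if pyStrLt s1 s2 then 1
    else 0

-- ===== PORT B =====
def twocmp_alt (x : String) (y : String) : Int :=
  let s1 := x.toList ++ y.toList          -- x + y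
  let s2 := y.toList ++ x.toList          -- y + x
  if pyStrLt s2 s1 then -1
  else if pyStrLt s1 s2 then 1
  else 0

-- ===== PRECONDITION & SPEC =====
def Spec_twocmp (x : String) (y : String) (out : Int) : Prop := out = twocmp_alt x y
instance (x : String) (y : String) (out : Int) : Decidable (Spec_twocmp x y out) := by unfold Spec_twocmp; infer_instance

-- ===== CLAIM (what is proved, stated in full; the proofs are below) =====
def Claim_equal_twocmp : Prop := ∀ (x : String) (y : String), Dom_twocmp x y → Spec_twocmp x y (twocmp x y)

-- ===== LEMMAS AND PROOFS =====

-- The early-exit of A's prefix loop already decides the concatenation comparison: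
-- if the loop returns some r on (a, b), then the three-way lexicographic comparison
-- of a ++ u vs b ++ v (any suffixes u, v) is r.
theorem twocmpLoop_decides (a : List Char) :
    ∀ (b u v : List Char) (r : Int), twocmpLoop a b = some r →
      (if pyStrLt (b ++ v) (a ++ u) then (-1 : Int)
       else if pyStrLt (a ++ u) (b ++ v) then 1 else 0) = r := by
  induction a with
  | nil => intro b u v r h; cases b <;> simp [twocmpLoop] at h
  | cons c s ih =>
    intro b u v r h
    cases b with
    | nil => simp [twocmpLoop] at h
    | cons d t =>
      simp only [twocmpLoop] at h
      by_cases h1 : d < c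
      · simp only [h1, if_pos, Option.some.injEq] at h
        subst h
        simp [pyStrLt, h1]
      · by_cases h2 : c < d
        · simp only [h1, h2, if_pos, Option.some.injEq, if_false] at h
          subst h
          simp [pyStrLt, h1, h2]
        · simp only [h1, h2, if_false] at h
          have := ih t u v r h
          simpa [pyStrLt, h1, h2] using this

-- ===== VERDICT (by name: the statement is the Claim_ definition above) =====
theorem twocmp_spec : Claim_equal_twocmp := by
  intro x y _
  unfold Spec_twocmp twocmp twocmp_alt
  cases h : twocmpLoop x.toList y.toList with
  | none => rfl
  | some r =>
    exact (twocmpLoop_decides x.toList y.toList y.toList x.toList r h).symm
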